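-- pv_equiv track=rewrite | github.com/jimmijazz/csse | assignment.py | make_position_string
-- ===== SOURCE A (Python) =====
-- def make_position_string(length):
--     """Takes length of the state and returns a string of numbers representing positions.
--
--     int(number of players) -> str(position of players)"""
--
--     length_string = ""
--
--     count = 0
--     for a in range(length):
--         if count < 9:
--             length_string += str(count)
--             count += 1
--         else:
--             length_string += str(count)
--             count = 0
--     return(length_string)
-- ===== SOURCE B (Python) =====
-- def make_position_string(length):
--     """Takes length of the state and returns a string of numbers representing positions.
--
--     int(number of players) -> str(position of players)"""
--     if length <= 0:
--         return ""
--     blocks = (length + 9) // 10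
--     return ("0123456789" * blocks)[:length]
-- ===== Notes on version B (the rewrite author's own statement) =====
-- stated objective: faster
-- what changed: Instead of generating characters one at a time with a running counter, a reset branch and repeated string concatenation, B tiles the constant block "0123456789" ceil(length/10) times and slices the result to length.
import Mathlib
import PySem

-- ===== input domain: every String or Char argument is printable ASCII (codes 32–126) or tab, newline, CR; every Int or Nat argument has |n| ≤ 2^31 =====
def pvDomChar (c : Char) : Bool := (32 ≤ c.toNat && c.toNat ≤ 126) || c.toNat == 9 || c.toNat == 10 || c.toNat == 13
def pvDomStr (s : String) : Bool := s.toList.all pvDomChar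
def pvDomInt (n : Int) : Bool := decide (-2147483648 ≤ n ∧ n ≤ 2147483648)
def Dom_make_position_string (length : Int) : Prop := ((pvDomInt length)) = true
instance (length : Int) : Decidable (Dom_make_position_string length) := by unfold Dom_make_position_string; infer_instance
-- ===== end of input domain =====

-- B does not generate characters one by one: it tiles the block "0123456789" ceil(length/10) times and slices to length (objective: faster, measured).

-- ===== PORT A =====
def make_position_string (length : Int) : String :=
  let init : String × Int := ("", 0)
  let r := (PySem.List.pyRange 0 length 1).foldl
    (fun (st : String × Int) (_a : Int) =>
      if st.2 < 9 then (st.1 ++ PySem.Int.toStr st.2, st.2 + 1)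
      else (st.1 ++ PySem.Int.toStr st.2, 0)) init
  r.1

-- ===== PORT B =====
-- hand port of Python's string repetition s * q (exact: q ≤ 0 yields "", else q copies)
def pyStrRepeat (s : String) (q : Int) : String :=
  String.ofList (List.replicate q.toNat s.toList).flatten

def make_position_string_alt (length : Int) : String :=
  if length ≤ 0 then ""
  else
    let blocks := PySem.Int.floordiv (length + 9) 10
    PySem.Str.slice (pyStrRepeat "0123456789" blocks) none (some length)

-- ===== PRECONDITION & SPEC =====
def Spec_make_position_string (length : Int) (out : String) : Prop := out = make_position_string_alt length
instance (length : Int) (out : String) : Decidable (Spec_make_position_string length out) := by unfold Spec_make_position_string; infer_instance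

-- ===== CLAIM (what is proved, stated in full; the proofs are below) =====
def Claim_equal_make_position_string : Prop := ∀ (length : Int), Dom_make_position_string length → Spec_make_position_string length (make_position_string length)

-- ===== LEMMAS AND PROOFS =====

-- the character A appends at position n
def pvDg (n : Nat) : Char := Char.ofNat (48 + n % 10)

lemma toStr_lt10 (j : Nat) (h : j < 10) :
    PySem.Int.toStr (j : Int) = String.ofList [Char.ofNat (48 + j)] := by
  interval_cases j <;> rfl

lemma toStr_mod (n : Nat) : PySem.Int.toStr ((n : Int) % 10) = String.ofList [pvDg n] := by
  have h : (n : Int) % 10 = ((n % 10 : Nat) : Int) := by push_cast; omega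
  rw [h, toStr_lt10 (n % 10) (Nat.mod_lt _ (by omega))]; rfl

lemma ofList_append_str (l : List Char) (c : Char) :
    String.ofList l ++ String.ofList [c] = String.ofList (l ++ [c]) := by
  simp [String.ofList_append]

lemma invA (n : Nat) :
    (PySem.List.pyRange 0 (n : Int) 1).foldl
      (fun (st : String × Int) (_a : Int) =>
        if st.2 < 9 then (st.1 ++ PySem.Int.toStr st.2, st.2 + 1)
        else (st.1 ++ PySem.Int.toStr st.2, 0)) ("", 0)
    = (String.ofList ((List.range n).map pvDg), (n : Int) % 10) := by
  induction n with
  | zero => simp [PySem.List.pyRange_one_eq_nil]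
  | succ n ih =>
    have hn : (0:Int) ≤ (n:Int) := Int.natCast_nonneg n
    have hcast : ((n+1 : Nat) : Int) = (n : Int) + 1 := by simp
    rw [hcast, PySem.List.pyRange_one_succ_right hn, List.foldl_append, ih]
    simp only [List.foldl_cons, List.foldl_nil, List.range_succ, List.map_append,
      List.map_singleton]
    rw [toStr_mod, ofList_append_str]
    by_cases h : (n : Int) % 10 < 9
    · rw [if_pos h]; refine Prod.ext rfl ?_; simp; omega
    · rw [if_neg h]; refine Prod.ext rfl ?_; simp; omega

lemma tile (q : Nat) :
    (List.replicate q ("0123456789".toList)).flatten = (List.range (10*q)).map pvDg := by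
  induction q with
  | zero => rfl
  | succ q ih =>
    rw [List.replicate_succ', List.flatten_append, ih, Nat.mul_succ, List.range_add,
      List.map_append, List.map_map]
    refine congrArg _ ?_
    have : ((List.range 10).map (pvDg ∘ (fun j => 10*q + j))) = (List.range 10).map pvDg := by
      refine List.map_congr_left (fun j hj => ?_)
      simp only [Function.comp, pvDg]
      congr 1
      omega
    rw [this]; rfl

-- ===== VERDICT (by name: the statement is the Claim_ definition above) =====
theorem make_position_string_spec : Claim_equal_make_position_string := by
  intro length _
  unfold Spec_make_position_string make_position_string make_position_string_alt
  by_cases h : length ≤ 0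
  · rw [if_pos h, PySem.List.pyRange_one_eq_nil h]; rfl
  · rw [if_neg h]
    have h : 0 < length := by omega
    obtain ⟨n, rfl⟩ : ∃ n : Nat, length = (n : Int) := ⟨length.toNat, (Int.toNat_of_nonneg h.le).symm⟩
    simp only [invA n]
    have hq : (PySem.Int.floordiv ((n : Int) + 9) 10).toNat = (n + 9) / 10 := by
      rw [PySem.Int.floordiv_eq_ediv_of_pos (by omega)]; omega
    have hle : n ≤ 10 * ((n + 9) / 10) := by omega
    simp only [pyStrRepeat, hq, PySem.Str.slice]
    rw [tile]
    simp only [String.toList_ofList]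
    simp only [PySem.Chars.slice]
    rw [PySem.List.slice_to _ (by omega : (0:Int) ≤ (n:Int))]
    rw [Int.toNat_natCast, ← List.map_take, List.take_range]
    rw [Nat.min_eq_left hle]
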